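-- pv_equiv track=rewrite | github.com/akkana/pi-zero-w-book | multiplex/keyboard.py | bits
-- ===== SOURCE A (Python) =====
-- def bits(number):
--     '''Given a number, returns a list of the bit positions that are on.
--        e.g. bits(5) will yield 0, 2.
--     '''
--     bit = 1
--     i = 0
--     while number >= bit:
--        if number & bit:
--            yield i
--        bit <<= 1
--        i += 1
-- ===== SOURCE B (Python) =====
-- def bits(number):
--     '''Given a number, returns a list of the bit positions that are on.
--        e.g. bits(5) will yield 0, 2.
--     '''
--     if number >= 1:
--         if number % 2:
--             yield 0
--         for p in bits(number // 2):
--             yield p + 1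
-- ===== Notes on version B (the rewrite author's own statement) =====
-- stated objective: alternative
-- what changed: B replaces A's while-loop that doubles a mask with a position counter by a direct recursion on halving the number: the lowest position is yielded when the number is odd, then the recursive positions of the halved number are re-yielded shifted up by one.
import Mathlib
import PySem

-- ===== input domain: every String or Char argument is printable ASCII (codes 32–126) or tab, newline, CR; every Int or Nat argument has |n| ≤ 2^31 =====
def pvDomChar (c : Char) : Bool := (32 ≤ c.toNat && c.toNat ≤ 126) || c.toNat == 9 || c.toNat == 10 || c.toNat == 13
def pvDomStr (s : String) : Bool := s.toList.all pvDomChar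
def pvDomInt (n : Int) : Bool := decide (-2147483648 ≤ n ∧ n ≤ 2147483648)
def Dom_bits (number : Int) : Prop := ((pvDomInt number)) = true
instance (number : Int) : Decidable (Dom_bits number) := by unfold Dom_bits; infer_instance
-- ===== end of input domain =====

-- B replaces A's mask-doubling while-loop (bit <<= 1, counter i) by a direct recursion on
-- halving the number (yield 0 if odd, then shift the recursive positions by 1): alternative
-- decomposition, same cost. Equivalence is total (both yield nothing for number < 1).

-- ===== PORT A =====
-- A's loop 'while number >= bit: if number & bit: yield i; bit <<= 1; i += 1'.
-- The extra hypothesis 0 < bit is only the termination invariant (the loop is entered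
-- with bit = 1); the computation is A's, step for step.
def bitsLoop (number : Int) (bit : Int) (i : Int) (hbit : 0 < bit) : List Int :=
  if _h : bit ≤ number then
    (if PySem.Int.band number bit ≠ 0 then [i] else []) ++
      bitsLoop number (bit <<< (1 : Nat)) (i + 1)
        (by rw [Int.shiftLeft_eq]; omega)
  else []
termination_by (number + 1 - bit).toNat
decreasing_by
  rw [Int.shiftLeft_eq]
  simp only [pow_one]
  omega

def bits (number : Int) : List Int :=
  bitsLoop number 1 0 (by norm_num)

-- ===== PORT B =====
-- B: 'if number >= 1: (yield 0 if number % 2) ; yield p + 1 for p in bits(number // 2)'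
def bits_alt (number : Int) : List Int :=
  if _h : 1 ≤ number then
    (if PySem.Int.mod number 2 ≠ 0 then [0] else []) ++
      (bits_alt (PySem.Int.floordiv number 2)).map (· + 1)
  else []
termination_by number.toNat
decreasing_by
  rw [PySem.Int.floordiv_eq_ediv_of_pos (by omega : (0:Int) < 2)]
  omega

-- ===== PRECONDITION & SPEC =====
def Spec_bits (number : Int) (out : List Int) : Prop := out = bits_alt number
instance (number : Int) (out : List Int) : Decidable (Spec_bits number out) := by unfold Spec_bits; infer_instance

-- ===== CLAIM (what is proved, stated in full; the proofs are below) =====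
def Claim_equal_bits : Prop := ∀ (number : Int), Dom_bits number → Spec_bits number (bits number)

-- ===== LEMMAS AND PROOFS =====

-- a & 2b = 2 * ((a / 2) & b) on Nat
theorem land_two_mul (a b : Nat) : a &&& 2 * b = 2 * (a / 2 &&& b) := by
  apply Nat.eq_of_testBit_eq
  intro i
  cases i with
  | zero =>
    simp [Nat.testBit_zero, Nat.mul_mod_right]
  | succ j =>
    rw [Nat.testBit_succ, Nat.testBit_succ, Nat.and_div_two,
      Nat.mul_div_cancel_left b (by omega : 0 < 2),
      Nat.mul_div_cancel_left (a / 2 &&& b) (by omega : 0 < 2)]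

-- the loop with mask 2*bit and counter i+1 computes the shifted positions of number // 2
theorem bitsLoop_shift : ∀ (k : Nat) (n bit : Int), 0 ≤ n → ∀ (hb : 0 < bit)
    (hb2 : 0 < bit <<< (1 : Nat)) (i : Int), (n + 1 - bit).toNat = k →
    bitsLoop n (bit <<< (1 : Nat)) (i + 1) hb2 =
      (bitsLoop (PySem.Int.floordiv n 2) bit i hb).map (· + 1) := by
  intro k
  induction k using Nat.strong_induction_on with
  | _ k ih =>
    intro n bit hn hb hb2 i hk
    have hsl : bit <<< (1 : Nat) = 2 * bit := by rw [Int.shiftLeft_eq]; ring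
    have hfd : PySem.Int.floordiv n 2 = n / 2 :=
      PySem.Int.floordiv_eq_ediv_of_pos (by omega)
    conv_lhs => rw [bitsLoop]
    conv_rhs => rw [bitsLoop]
    rw [hfd]
    by_cases hc : bit ≤ n / 2
    · have hc2 : bit <<< (1 : Nat) ≤ n := by omega
      rw [dif_pos hc2, dif_pos hc]
      have hband : (PySem.Int.band n (bit <<< (1 : Nat)) ≠ 0) ↔
          (PySem.Int.band (n / 2) bit ≠ 0) := by
        rw [hsl,
          PySem.Int.band_of_nonneg hn (by omega),
          PySem.Int.band_of_nonneg (by omega : (0:Int) ≤ n / 2) (by omega : (0:Int) ≤ bit)]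
        have h2b : (2 * bit).toNat = 2 * bit.toNat := by omega
        have hn2 : (n / 2).toNat = n.toNat / 2 := by omega
        rw [h2b, hn2, land_two_mul]
        constructor <;> intro h <;> intro hz <;> apply h <;>
          simp only [Int.natCast_eq_zero] at * <;> omega
      have hrec : bitsLoop n (bit <<< (1 : Nat) <<< (1 : Nat)) (i + 1 + 1)
            (by rw [Int.shiftLeft_eq]; omega) =
          (bitsLoop (n / 2) (bit <<< (1 : Nat)) (i + 1) hb2).map (· + 1) := by
        have h := ih (n + 1 - bit <<< (1 : Nat)).toNat (by omega) n (bit <<< (1 : Nat)) hn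
          (by omega) (by rw [Int.shiftLeft_eq]; omega) (i + 1) rfl
        rw [hfd] at h
        exact h
      rw [hrec]
      by_cases hq : PySem.Int.band (n / 2) bit ≠ 0
      · rw [if_pos (hband.mpr hq), if_pos hq]
        simp
      · rw [if_neg (fun h => hq (hband.mp h)), if_neg hq]
        simp
    · rw [dif_neg (by omega : ¬ bit <<< (1 : Nat) ≤ n), dif_neg hc]
      simp

theorem bits_eq_alt : ∀ (k : Nat) (n : Int), n.toNat = k →
    bitsLoop n 1 0 (by norm_num) = bits_alt n := by
  intro k
  induction k using Nat.strong_induction_on with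
  | _ k ih =>
    intro n hk
    conv_lhs => rw [bitsLoop]
    conv_rhs => rw [bits_alt]
    by_cases h1 : 1 ≤ n
    · rw [dif_pos h1, dif_pos h1]
      have hfd : PySem.Int.floordiv n 2 = n / 2 :=
        PySem.Int.floordiv_eq_ediv_of_pos (by omega)
      have htail : bitsLoop n ((1 : Int) <<< (1 : Nat)) (0 + 1) (by rw [Int.shiftLeft_eq]; omega) =
          (bitsLoop (PySem.Int.floordiv n 2) 1 0 (by norm_num)).map (· + 1) :=
        bitsLoop_shift (n + 1 - 1).toNat n 1 (by omega) (by norm_num) _ 0 rfl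
      rw [htail, ih (PySem.Int.floordiv n 2).toNat (by rw [hfd]; omega) _ rfl,
        PySem.Int.band_one]
    · rw [dif_neg h1]
      simp [dif_neg h1]

-- ===== VERDICT (by name: the statement is the Claim_ definition above) =====
theorem bits_spec : Claim_equal_bits := by
  intro number _
  unfold Spec_bits bits
  exact bits_eq_alt number.toNat number rfl
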